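-- pv_equiv track=rewrite | github.com/ravikiransharvirala/coding-problems | test_sep01.py | postional_elements
-- ===== SOURCE A (Python) =====
-- def postional_elements(nums):
--     pos_elem_set = set()
--     for i in range(len(nums)):
--         rowmin = float('inf')
--         rowmax = float('-inf')
--         for j in range(len(nums[0])):
--             if nums[i][j] < rowmin:
--                 rowmin = nums[i][j]
--             if nums[i][j] > rowmax:
--                 rowmax = nums[i][j]
--         pos_elem_set.add(rowmin)
--         pos_elem_set.add(rowmax)
--
--     for j in range(len(nums[0])):
--         colmin = float('inf')
--         colmax = float('-inf')
--         for i in range(len(nums)):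
--             if nums[i][j] < colmin:
--                 colmin = nums[i][j]
--             if nums[i][j] > colmax:
--                 colmax = nums[i][j]
--         pos_elem_set.add(colmin)
--         pos_elem_set.add(colmax)
--     return len(pos_elem_set)
-- ===== SOURCE B (Python) =====
-- def postional_elements(nums):
--     w = len(nums[0])
--     colmin = nums[0][:w]
--     colmax = nums[0][:w]
--     vals = set()
--     for row in nums:
--         r = row[:w]
--         vals.add(min(r))
--         vals.add(max(r))
--         colmin = [min(c, x) for c, x in zip(colmin, r)]
--         colmax = [max(c, x) for c, x in zip(colmax, r)]
--     vals.update(colmin)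
--     vals.update(colmax)
--     return len(vals)
-- ===== Notes on version B (the rewrite author's own statement) =====
-- stated objective: alternative
-- what changed: B makes a single pass over the rows, maintaining running column-min/column-max lists and taking each row's min/max with the builtins, instead of A's two separate index-driven passes (rows, then columns) with float-infinity sentinels.
-- outside the precondition, e.g. on postional_elements([[]]): A returns 2, B raises ValueError; on postional_elements([[], [1]]): A returns 2, B raises ValueError
import Mathlib
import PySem

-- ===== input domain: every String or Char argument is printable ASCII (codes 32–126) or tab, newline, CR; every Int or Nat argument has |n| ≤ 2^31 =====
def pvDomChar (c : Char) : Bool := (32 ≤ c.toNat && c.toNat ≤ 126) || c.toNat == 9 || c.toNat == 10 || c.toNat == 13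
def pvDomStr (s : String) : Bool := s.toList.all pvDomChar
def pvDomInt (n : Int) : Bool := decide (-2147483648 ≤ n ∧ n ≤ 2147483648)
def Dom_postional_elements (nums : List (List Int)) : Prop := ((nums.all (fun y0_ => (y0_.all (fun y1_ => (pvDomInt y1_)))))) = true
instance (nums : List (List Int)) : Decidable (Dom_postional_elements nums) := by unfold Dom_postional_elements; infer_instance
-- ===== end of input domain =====

-- B replaces A's two index-driven passes (rows, then columns) by a single fold over the
-- rows that maintains running column-min/column-max lists, using builtin min/max per row;
-- objective: alternative decomposition (one traversal of the matrix instead of two).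

-- ===== PORT A =====
-- rowmin/rowmax start at float('inf')/float('-inf'): modelled as Option Int (none = the
-- infinite sentinel; every comparison against it succeeds, exactly as in Python).
def pvLtInf (x : Int) : Option Int → Bool
  | none => true
  | some v => decide (x < v)

def pvGtNegInf (x : Int) : Option Int → Bool
  | none => true
  | some v => decide (v < x)

-- set.add of the accumulated value; 'none' (the float sentinel, reachable only when
-- len(nums[0]) = 0, which Pre_ excludes) is not added — inexact only there.
def pvAddOpt (s : PySem.Set Int) : Option Int → PySem.Set Int
  | none => s
  | some v => PySem.Set.add s v

-- one min/max-tracking step of A's inner loops: 'if x < cur: cur = x; if x > cur2: cur2 = x'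
def pvStep (p : Option Int × Option Int) (x : Int) : Option Int × Option Int :=
  (if pvLtInf x p.1 then some x else p.1, if pvGtNegInf x p.2 then some x else p.2)

-- indexing nums[i][j] is ported with pyGetD (default dummy); exact whenever the index is in
-- range, which Pre_ guarantees.
def postional_elements (nums : List (List Int)) : Int :=
  let w : Int := PySem.List.len ((PySem.List.pyGet? nums 0).getD [])
  let s1 := (PySem.List.pyRange 0 (PySem.List.len nums) 1).foldl
    (fun (s : PySem.Set Int) i =>
      let p := (PySem.List.pyRange 0 w 1).foldl
        (fun (p : Option Int × Option Int) j =>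
          pvStep p (PySem.List.pyGetD (PySem.List.pyGetD nums i []) j 0))
        (none, none)
      pvAddOpt (pvAddOpt s p.1) p.2)
    PySem.Set.empty
  let s2 := (PySem.List.pyRange 0 w 1).foldl
    (fun (s : PySem.Set Int) j =>
      let p := (PySem.List.pyRange 0 (PySem.List.len nums) 1).foldl
        (fun (p : Option Int × Option Int) i =>
          pvStep p (PySem.List.pyGetD (PySem.List.pyGetD nums i []) j 0))
        (none, none)
      pvAddOpt (pvAddOpt s p.1) p.2)
    s1
  PySem.Set.len s2

-- ===== PORT B =====
-- 'colmin = [min(c, x) for c, x in zip(colmin, r)]'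
def pvZipMin (c r : List Int) : List Int := (c.zip r).map (fun p => min p.1 p.2)
def pvZipMax (c r : List Int) : List Int := (c.zip r).map (fun p => max p.1 p.2)

-- min(r)/max(r): Python raises ValueError on an empty r (first row empty — outside Pre_);
-- the port's .getD 0 is a dummy there and exact everywhere else.
def postional_elements_alt (nums : List (List Int)) : Int :=
  let row0 := PySem.List.pyGetD nums 0 []
  let w := row0.length
  let st := nums.foldl
    (fun (st : PySem.Set Int × List Int × List Int) row =>
      let r := row.take w   -- row[:w]
      let vals := PySem.Set.add
        (PySem.Set.add st.1 ((PySem.List.min? r (fun x => x)).getD 0))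
        ((PySem.List.max? r (fun x => x)).getD 0)
      (vals, pvZipMin st.2.1 r, pvZipMax st.2.2 r))
    (PySem.Set.empty, row0.take w, row0.take w)
  PySem.Set.len (PySem.Set.update (PySem.Set.update st.1 st.2.1) st.2.2)

-- ===== PRECONDITION & SPEC =====
-- Pre_ excludes (a) the empty matrix and rows shorter than the first row, where A raises
-- IndexError, and (b) matrices whose FIRST ROW IS EMPTY, where A still returns 2 because the
-- float('inf')/float('-inf') sentinels themselves land in the set — an artefact of A's
-- sentinel initialisation that B's builtin min/max cannot produce (B raises ValueError there).
def Pre_postional_elements (nums : List (List Int)) : Prop :=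
  nums ≠ [] ∧ 0 < (nums.headI).length ∧ ∀ row ∈ nums, (nums.headI).length ≤ row.length

instance (nums : List (List Int)) : Decidable (Pre_postional_elements nums) := by
  unfold Pre_postional_elements; infer_instance

def pvWitness_postional_elements : List (List Int) := [[1, 2], [3, 4]]

def Spec_postional_elements (nums : List (List Int)) (out : Int) : Prop := out = postional_elements_alt nums
instance (nums : List (List Int)) (out : Int) : Decidable (Spec_postional_elements nums out) := by unfold Spec_postional_elements; infer_instance

-- ===== CLAIM (what is proved, stated in full; the proofs are below) =====
def Claim_equal_postional_elements : Prop := ∀ (nums : List (List Int)), Dom_postional_elements nums → Pre_postional_elements nums → Spec_postional_elements nums (postional_elements nums)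


-- ===== LEMMAS AND PROOFS =====

-- value-level descriptions used by the proofs
def pvRmin (r : List Int) : Int := (PySem.List.min? r (fun x => x)).getD 0
def pvRmax (r : List Int) : Int := (PySem.List.max? r (fun x => x)).getD 0
def pvCol (nums : List (List Int)) (j : Nat) : List Int :=
  nums.map (fun row => PySem.List.pyGetD row (j : Int) 0)
def pvRowVals (w : Nat) (nums : List (List Int)) : List Int :=
  nums.flatMap (fun row => [pvRmin (row.take w), pvRmax (row.take w)])

lemma pvRmin_cons (x : Int) (t : List Int) : pvRmin (x :: t) = t.foldl min x := by
  simp [pvRmin, PySem.List.min?_id_cons]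

lemma pvRmax_cons (x : Int) (t : List Int) : pvRmax (x :: t) = t.foldl max x := by
  simp [pvRmax, PySem.List.max?_id_cons]

-- an index loop over range(w), w ≤ len(row), reading row[j], is a fold over row[:w]
lemma pv_foldl_take {a : Type} (row : List Int) (w : Nat) (f : a → Int → a) :
    w ≤ row.length →
    ∀ init : a,
      (PySem.List.pyRange 0 (w : Int) 1).foldl
          (fun acc j => f acc (PySem.List.pyGetD row j 0)) init
        = (row.take w).foldl f init := by
  induction w with
  | zero => intro _ init; simp
  | succ n ih =>
    intro h init
    have hn : n < row.length := h
    rw [PySem.List.pyRange_zero_natCast, List.foldl_map, List.range_succ,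
        List.foldl_append, List.take_add_one]
    rw [List.getElem?_eq_getElem hn]
    rw [List.foldl_append]
    have := ih (Nat.le_of_succ_le h) init
    rw [PySem.List.pyRange_zero_natCast, List.foldl_map] at this
    rw [this]
    simp [PySem.List.pyGetD_natCast, List.getD_eq_getElem?_getD, List.getElem?_eq_getElem hn]

-- the running min/max pair after the sentinels have been replaced
lemma pv_step_fold (t : List Int) :
    ∀ a b : Int, t.foldl pvStep (some a, some b) = (some (t.foldl min a), some (t.foldl max b)) := by
  induction t with
  | nil => intro a b; rfl
  | cons x t ih =>
    intro a b
    have h1 : pvStep (some a, some b) x = (some (min a x), some (max b x)) := by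
      simp only [pvStep, pvLtInf, pvGtNegInf, Prod.mk.injEq]
      constructor
      · by_cases h : x < a
        · rw [if_pos (by simpa using h), min_eq_right h.le]
        · rw [if_neg (by simpa using h), min_eq_left (not_lt.mp h)]
      · by_cases h : b < x
        · rw [if_pos (by simpa using h), max_eq_right h.le]
        · rw [if_neg (by simpa using h), max_eq_left (not_lt.mp h)]
    simp only [List.foldl_cons, h1, ih]

lemma pv_step_fold_cons (x : Int) (t : List Int) :
    (x :: t).foldl pvStep (none, none) = (some (pvRmin (x :: t)), some (pvRmax (x :: t))) := by
  have h0 : pvStep (none, none) x = (some x, some x) := rfl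
  simp only [List.foldl_cons, h0, pv_step_fold, pvRmin_cons, pvRmax_cons]

-- two adds per element = folding the flattened pair list into the set
lemma pv_foldl_pairs {b : Type} (l : List b) (f g : b → Int) :
    ∀ s : PySem.Set Int,
      l.foldl (fun s x => PySem.Set.add (PySem.Set.add s (f x)) (g x)) s
        = (l.flatMap (fun x => [f x, g x])).foldl PySem.Set.add s := by
  induction l with
  | nil => intro s; rfl
  | cons x t ih => intro s; simp only [List.foldl_cons, List.flatMap_cons, ih,
      List.cons_append, List.nil_append, List.foldl_cons]

-- set built by repeated add: nodup, membership = membership of the added list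
lemma pv_set_fold (l : List Int) :
    ∀ s : PySem.Set Int, s.Nodup →
      (l.foldl PySem.Set.add s).Nodup ∧
        ∀ x, (x ∈ l.foldl PySem.Set.add s ↔ x ∈ s ∨ x ∈ l) := by
  induction l with
  | nil => intro s hs; simpa using hs
  | cons y t ih =>
    intro s hs
    obtain ⟨h1, h2⟩ := ih (PySem.Set.add s y) (PySem.Set.nodup_add s y hs)
    refine ⟨h1, fun x => ?_⟩
    rw [List.foldl_cons, h2 x, PySem.Set.mem_add]
    simp
    tauto

-- a fold with three independent accumulators is three folds
lemma pv_foldl_triple {A B C D : Type} (l : List D)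
    (f : A → D → A) (g : B → D → B) (h : C → D → C) :
    ∀ (x : A) (y : B) (z : C),
      l.foldl (fun s e => (f s.1 e, g s.2.1 e, h s.2.2 e)) (x, y, z)
        = (l.foldl f x, l.foldl g y, l.foldl h z) := by
  induction l with
  | nil => intros; rfl
  | cons d t ih => intro x y z; simp only [List.foldl_cons, ih]

-- B's running column list after folding the rows, elementwise
lemma pv_colfold (op : Int → Int → Int) (w : Nat) (t : List (List Int)) :
    (∀ row ∈ t, w ≤ row.length) →
    ∀ c : List Int, c.length = w →
      t.foldl (fun c row => ((c.zip (row.take w)).map (fun p => op p.1 p.2))) c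
        = (List.range w).map (fun j => (pvCol t j).foldl op (c.getD j 0)) := by
  induction t with
  | nil =>
    intro _ c hc
    symm
    apply List.ext_getElem (by simp [hc])
    intro j h1 h2
    simp only [pvCol, List.map_nil, List.foldl_nil, List.getElem_map, List.getElem_range]
    simp only [List.length_map, List.length_range] at h1
    rw [List.getD_eq_getElem c 0 (by omega)]
  | cons row t ih =>
    intro hlen c hc
    have hrow : w ≤ row.length := hlen row (by simp)
    have hc' : ((c.zip (row.take w)).map (fun p => op p.1 p.2)).length = w := by
      simp [List.length_zip, hc, List.length_take, Nat.min_eq_left hrow]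
    rw [List.foldl_cons, ih (fun r hr => hlen r (by simp [hr])) _ hc']
    apply List.map_congr_left
    intro j hj
    simp only [List.mem_range] at hj
    have hj1 : j < row.length := lt_of_lt_of_le hj hrow
    have hgd : ((c.zip (row.take w)).map (fun p => op p.1 p.2)).getD j 0
        = op (c.getD j 0) (PySem.List.pyGetD row (j : Int) 0) := by
      rw [List.getD_eq_getElem _ 0 (by omega)]
      rw [List.getD_eq_getElem c 0 (by omega)]
      simp [List.getElem_zip, List.getElem_take, PySem.List.pyGetD_natCast,
        List.getD_eq_getElem?_getD, List.getElem?_eq_getElem hj1]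
    rw [hgd]
    simp [pvCol]


-- A's row body: index loop + sentinel pair + two adds, rewritten to values
lemma pv_row_body (row : List Int) (w : Nat) (h1 : w ≤ row.length) (h2 : 0 < w)
    (s : PySem.Set Int) :
    (let p := (PySem.List.pyRange 0 (w : Int) 1).foldl
        (fun p j => pvStep p (PySem.List.pyGetD row j 0)) (none, none)
     pvAddOpt (pvAddOpt s p.1) p.2)
      = PySem.Set.add (PySem.Set.add s (pvRmin (row.take w))) (pvRmax (row.take w)) := by
  have hnil : row.take w ≠ [] := by
    rw [Ne, List.take_eq_nil_iff]
    rintro (h | h)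
    · omega
    · subst h
      simp at h1
      omega
  obtain ⟨x, t, hxt⟩ : ∃ x t, row.take w = x :: t := by
    cases h : row.take w with
    | nil => exact absurd h hnil
    | cons x t => exact ⟨x, t, rfl⟩
  have hp : (PySem.List.pyRange 0 (w : Int) 1).foldl
      (fun p j => pvStep p (PySem.List.pyGetD row j 0)) (none, none)
        = (some (pvRmin (row.take w)), some (pvRmax (row.take w))) := by
    rw [pv_foldl_take row w pvStep h1, hxt, pv_step_fold_cons, ← hxt]
  simp only [hp]
  rfl

lemma pv_col_cons (r : List Int) (t : List (List Int)) (j : Nat) :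
    pvCol (r :: t) j = PySem.List.pyGetD r (j : Int) 0 :: pvCol t j := rfl

-- A's column body, rewritten to values
lemma pv_col_body (r0 : List Int) (rest : List (List Int)) (j : Int) (s : PySem.Set Int) :
    (let p := (PySem.List.pyRange 0 (PySem.List.len (r0 :: rest)) 1).foldl
        (fun p i => pvStep p (PySem.List.pyGetD (PySem.List.pyGetD (r0 :: rest) i []) j 0))
        (none, none)
     pvAddOpt (pvAddOpt s p.1) p.2)
      = PySem.Set.add (PySem.Set.add s (pvRmin ((r0 :: rest).map (fun row => PySem.List.pyGetD row j 0))))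
          (pvRmax ((r0 :: rest).map (fun row => PySem.List.pyGetD row j 0))) := by
  have hp : (PySem.List.pyRange 0 (PySem.List.len (r0 :: rest)) 1).foldl
      (fun p i => pvStep p (PySem.List.pyGetD (PySem.List.pyGetD (r0 :: rest) i []) j 0))
      (none, none)
        = (some (pvRmin ((r0 :: rest).map (fun row => PySem.List.pyGetD row j 0))),
           some (pvRmax ((r0 :: rest).map (fun row => PySem.List.pyGetD row j 0)))) := by
    rw [PySem.List.foldl_pyRange_zero_pyGetD (r0 :: rest) []
      (fun p row => pvStep p (PySem.List.pyGetD row j 0)) (none, none)]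
    rw [← List.foldl_map]
    rw [List.map_cons, pv_step_fold_cons]
  simp only [hp]
  rfl

-- characterization of A under Pre_
lemma pv_A_char (r0 : List Int) (rest : List (List Int))
    (hw0 : 0 < r0.length)
    (hlen : ∀ row ∈ r0 :: rest, r0.length ≤ row.length) :
    postional_elements (r0 :: rest)
      = PySem.Set.len
          (List.foldl PySem.Set.add PySem.Set.empty
            (pvRowVals r0.length (r0 :: rest)
              ++ (List.range r0.length).flatMap
                  (fun j => [pvRmin (pvCol (r0 :: rest) j), pvRmax (pvCol (r0 :: rest) j)]))) := by
  simp only [postional_elements]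
  have hw : PySem.List.len ((PySem.List.pyGet? (r0 :: rest) 0).getD [])
      = ((r0.length : Nat) : Int) := by
    simp [PySem.List.pyGet?, PySem.List.pyIdx?]
  rw [hw]
  rw [PySem.List.foldl_pyRange_zero_pyGetD (r0 :: rest) []
      (fun s row =>
        let p := (PySem.List.pyRange 0 ((r0.length : Nat) : Int) 1).foldl
          (fun p j => pvStep p (PySem.List.pyGetD row j 0)) (none, none)
        pvAddOpt (pvAddOpt s p.1) p.2) PySem.Set.empty]
  rw [PySem.List.foldl_congr_mem (r0 :: rest) _
      (fun s row => PySem.Set.add (PySem.Set.add s (pvRmin (row.take r0.length)))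
        (pvRmax (row.take r0.length))) PySem.Set.empty
      (fun s row hrow => pv_row_body row r0.length (hlen row hrow) hw0 s)]
  rw [pv_foldl_pairs]
  rw [PySem.List.pyRange_zero_natCast r0.length, List.foldl_map]
  rw [PySem.List.foldl_congr_mem (List.range r0.length) _
      (fun s j => PySem.Set.add (PySem.Set.add s (pvRmin (pvCol (r0 :: rest) j)))
        (pvRmax (pvCol (r0 :: rest) j))) _
      (fun s j hj => pv_col_body r0 rest (j : Int) s)]
  rw [pv_foldl_pairs]
  rw [List.foldl_append]
  rfl

-- characterization of B under Pre_
lemma pv_B_char (r0 : List Int) (rest : List (List Int))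
    (hlen : ∀ row ∈ r0 :: rest, r0.length ≤ row.length) :
    postional_elements_alt (r0 :: rest)
      = PySem.Set.len
          (List.foldl PySem.Set.add PySem.Set.empty
            (pvRowVals r0.length (r0 :: rest)
              ++ (List.range r0.length).map (fun j => pvRmin (pvCol (r0 :: rest) j))
              ++ (List.range r0.length).map (fun j => pvRmax (pvCol (r0 :: rest) j)))) := by
  simp only [postional_elements_alt]
  have h0 : PySem.List.pyGetD (r0 :: rest) 0 [] = r0 := by
    simp [PySem.List.pyGetD]
  rw [h0]
  rw [pv_foldl_triple (r0 :: rest)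
      (fun s row => PySem.Set.add
        (PySem.Set.add s ((PySem.List.min? (row.take r0.length) (fun x => x)).getD 0))
        ((PySem.List.max? (row.take r0.length) (fun x => x)).getD 0))
      (fun c row => pvZipMin c (row.take r0.length))
      (fun c row => pvZipMax c (row.take r0.length))
      PySem.Set.empty (r0.take r0.length) (r0.take r0.length)]
  have hcm : (r0 :: rest).foldl (fun c row => pvZipMin c (row.take r0.length)) (r0.take r0.length)
      = (List.range r0.length).map (fun j => pvRmin (pvCol (r0 :: rest) j)) := by
    simp only [pvZipMin]
    rw [pv_colfold min r0.length (r0 :: rest) hlen (r0.take r0.length) (by simp)]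
    apply List.map_congr_left
    intro j hj
    simp only [List.mem_range] at hj
    rw [List.take_length, pv_col_cons, pvRmin_cons, List.foldl_cons,
        PySem.List.pyGetD_natCast, List.getD_eq_getElem?_getD,
        List.getElem?_eq_getElem hj, Option.getD_some, min_self]
  have hcx : (r0 :: rest).foldl (fun c row => pvZipMax c (row.take r0.length)) (r0.take r0.length)
      = (List.range r0.length).map (fun j => pvRmax (pvCol (r0 :: rest) j)) := by
    simp only [pvZipMax]
    rw [pv_colfold max r0.length (r0 :: rest) hlen (r0.take r0.length) (by simp)]
    apply List.map_congr_left
    intro j hj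
    simp only [List.mem_range] at hj
    rw [List.take_length, pv_col_cons, pvRmax_cons, List.foldl_cons,
        PySem.List.pyGetD_natCast, List.getD_eq_getElem?_getD,
        List.getElem?_eq_getElem hj, Option.getD_some, max_self]
  rw [hcm, hcx, pv_foldl_pairs]
  simp only [PySem.Set.update]
  rw [List.foldl_append, List.foldl_append]
  rfl

-- ===== VERDICT (by name: the statement is the Claim_ definition above) =====
theorem postional_elements_spec : Claim_equal_postional_elements := by
  intro nums _ hpre
  obtain ⟨hne, hw0, hlen⟩ := hpre
  obtain ⟨r0, rest, rfl⟩ : ∃ a t, nums = a :: t := by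
    cases nums with
    | nil => exact absurd rfl hne
    | cons a t => exact ⟨a, t, rfl⟩
  simp only [List.headI] at hw0 hlen
  show postional_elements (r0 :: rest) = postional_elements_alt (r0 :: rest)
  rw [pv_A_char r0 rest hw0 hlen, pv_B_char r0 rest hlen]
  obtain ⟨hA1, hA2⟩ := pv_set_fold
    (pvRowVals r0.length (r0 :: rest)
      ++ (List.range r0.length).flatMap
          (fun j => [pvRmin (pvCol (r0 :: rest) j), pvRmax (pvCol (r0 :: rest) j)]))
    PySem.Set.empty (by simp [PySem.Set.empty])
  obtain ⟨hB1, hB2⟩ := pv_set_fold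
    (pvRowVals r0.length (r0 :: rest)
      ++ (List.range r0.length).map (fun j => pvRmin (pvCol (r0 :: rest) j))
      ++ (List.range r0.length).map (fun j => pvRmax (pvCol (r0 :: rest) j)))
    PySem.Set.empty (by simp [PySem.Set.empty])
  have hperm := (List.perm_ext_iff_of_nodup hA1 hB1).mpr (by
    intro x
    rw [hA2 x, hB2 x]
    simp only [PySem.Set.empty, List.not_mem_nil, false_or, List.mem_append,
      List.mem_flatMap, List.mem_map, List.mem_cons, List.not_mem_nil, or_false]
    constructor
    · rintro (h | ⟨j, hj, h | h⟩)
      · tauto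
      · exact Or.inl (Or.inr ⟨j, hj, h.symm⟩)
      · exact Or.inr ⟨j, hj, h.symm⟩
    · rintro ((h | ⟨j, hj, h⟩) | ⟨j, hj, h⟩)
      · tauto
      · exact Or.inr ⟨j, hj, Or.inl h.symm⟩
      · exact Or.inr ⟨j, hj, Or.inr h.symm⟩)
  simp only [PySem.Set.len]
  rw [hperm.length_eq]
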